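-- pv_equiv track=rewrite | github.com/maplesyrupman/mini_practices | taxi-zumzum.py | taxi_zum_zum
-- ===== SOURCE A (Python) =====
-- def taxi_zum_zum(moves):
--     x=0
--     y=0
--     direction= 1
--     for i in range(len(moves)):
--         if moves[i] == 'F':
--             if direction == 1:
--                 y+= 1
--             if direction == 2:
--                 x+= 1
--             if direction == 3:
--                 y-= 1
--             if direction == 4:
--                 x-= 1
--         if moves[i] == 'R':
--             direction+= 1
--             if direction == 5:
--                 direction = 1
--         if moves[i] == 'L':
--             direction-= 1
--             if direction == 0:
--                 direction = 4
--     return(x,y)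
-- ===== SOURCE B (Python) =====
-- def taxi_zum_zum(moves):
--     # Back-to-front pass with no heading state: the accumulator is the
--     # displacement produced by the already-seen suffix, expressed relative to
--     # facing north; a turn simply rotates that whole displacement.
--     x, y = 0, 0
--     for c in reversed(moves):
--         if c == 'F':
--             y += 1
--         elif c == 'R':
--             x, y = y, -x
--         elif c == 'L':
--             x, y = -y, x
--     return (x, y)
-- ===== Notes on version B (the rewrite author's own statement) =====
-- stated objective: alternative
-- what changed: B drops the heading state entirely: it scans the moves back to front, keeping only the displacement of the suffix relative to north, and each turn rotates that accumulated displacement (R: (x,y)->(y,-x), L: (x,y)->(-y,x)), while A simulates forward with a 1..4 direction code and a four-way decode branch.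
import Mathlib
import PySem

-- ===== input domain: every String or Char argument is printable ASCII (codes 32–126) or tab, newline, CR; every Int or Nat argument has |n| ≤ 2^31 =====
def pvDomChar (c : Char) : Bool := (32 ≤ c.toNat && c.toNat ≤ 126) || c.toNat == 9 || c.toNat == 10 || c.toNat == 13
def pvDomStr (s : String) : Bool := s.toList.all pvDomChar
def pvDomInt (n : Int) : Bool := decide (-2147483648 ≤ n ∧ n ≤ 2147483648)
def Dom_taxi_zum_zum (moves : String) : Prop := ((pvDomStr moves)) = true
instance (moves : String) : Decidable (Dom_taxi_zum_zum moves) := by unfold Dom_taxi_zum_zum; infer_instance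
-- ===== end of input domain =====

-- B replaces A's forward state-machine (1..4 heading code) by a stateless backward pass that
-- rotates the suffix's accumulated displacement on each turn (alternative decomposition; same cost).
-- ===== PORT A =====
def taxiStepA (s : (Int × Int) × Int) (c : Char) : (Int × Int) × Int :=
  let s1 :=
    if c = 'F' then
      let xy := s.1
      let xy := if s.2 = 1 then (xy.1, xy.2 + 1) else xy
      let xy := if s.2 = 2 then (xy.1 + 1, xy.2) else xy
      let xy := if s.2 = 3 then (xy.1, xy.2 - 1) else xy
      let xy := if s.2 = 4 then (xy.1 - 1, xy.2) else xy
      (xy, s.2)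
    else s
  let s2 :=
    if c = 'R' then
      let d := s1.2 + 1
      (s1.1, if d = 5 then 1 else d)
    else s1
  let s3 :=
    if c = 'L' then
      let d := s2.2 - 1
      (s2.1, if d = 0 then 4 else d)
    else s2
  s3

def taxi_zum_zum (moves : String) : Int × Int :=
  (moves.toList.foldl taxiStepA (((0 : Int), (0 : Int)), (1 : Int))).1

-- ===== PORT B =====
def taxiStepB (p : Int × Int) (c : Char) : Int × Int :=
  if c = 'F' then (p.1, p.2 + 1)
  else if c = 'R' then (p.2, -p.1)
  else if c = 'L' then (-p.2, p.1)
  else p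

def taxi_zum_zum_alt (moves : String) : Int × Int :=
  moves.toList.reverse.foldl taxiStepB ((0 : Int), (0 : Int))

-- ===== PRECONDITION & SPEC =====
def Spec_taxi_zum_zum (moves : String) (out : Int × Int) : Prop := out = taxi_zum_zum_alt moves
instance (moves : String) (out : Int × Int) : Decidable (Spec_taxi_zum_zum moves out) := by unfold Spec_taxi_zum_zum; infer_instance

-- ===== CLAIM (what is proved, stated in full; the proofs are below) =====
def Claim_equal_taxi_zum_zum : Prop := ∀ (moves : String), Dom_taxi_zum_zum moves → Spec_taxi_zum_zum moves (taxi_zum_zum moves)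

-- ===== LEMMAS AND PROOFS =====
-- rotation by direction code d: what a displacement relative to north looks like in world
-- coordinates when the taxi is heading d
def taxiRot (d : Int) (p : Int × Int) : Int × Int :=
  if d = 1 then p else if d = 2 then (p.2, -p.1) else if d = 3 then (-p.1, -p.2) else (-p.2, p.1)

theorem taxi_fold_key (cs : List Char) (xy : Int × Int) (d : Int)
    (hd : d = 1 ∨ d = 2 ∨ d = 3 ∨ d = 4) :
    (cs.foldl taxiStepA (xy, d)).1 =
      (xy.1 + (taxiRot d (cs.foldr (fun c p => taxiStepB p c) (0, 0))).1,
       xy.2 + (taxiRot d (cs.foldr (fun c p => taxiStepB p c) (0, 0))).2) := by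
  induction cs generalizing xy d with
  | nil => rcases hd with h | h | h | h <;> subst h <;> simp [taxiRot]
  | cons c cs ih =>
    simp only [List.foldl_cons, List.foldr_cons]
    have step : ∀ (xy' : Int × Int) (d' : Int), d' = 1 ∨ d' = 2 ∨ d' = 3 ∨ d' = 4 →
        (List.foldl taxiStepA (xy', d') cs).1 =
          (xy'.1 + (taxiRot d' (cs.foldr (fun c p => taxiStepB p c) (0, 0))).1,
           xy'.2 + (taxiRot d' (cs.foldr (fun c p => taxiStepB p c) (0, 0))).2) := ih
    generalize hp : cs.foldr (fun c p => taxiStepB p c) ((0 : Int), (0 : Int)) = p at step ⊢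
    by_cases hF : c = 'F'
    · rcases hd with h | h | h | h <;> subst h <;> subst hF <;>
        simp [taxiStepA, taxiStepB] <;>
        (first
          | rw [step _ 1 (by decide)] | rw [step _ 2 (by decide)]
          | rw [step _ 3 (by decide)] | rw [step _ 4 (by decide)]) <;>
        simp [taxiRot] <;> (first | (constructor <;> ring) | ring | omega)
    · by_cases hR : c = 'R'
      · rcases hd with h | h | h | h <;> subst h <;> subst hR <;>
          simp [taxiStepA, taxiStepB] <;>
          (first
            | rw [step _ 1 (by decide)] | rw [step _ 2 (by decide)]
            | rw [step _ 3 (by decide)] | rw [step _ 4 (by decide)]) <;>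
          simp [taxiRot] <;> (first | (constructor <;> ring) | ring | omega)
      · by_cases hL : c = 'L'
        · rcases hd with h | h | h | h <;> subst h <;> subst hL <;>
            simp [taxiStepA, taxiStepB] <;>
            (first
              | rw [step _ 1 (by decide)] | rw [step _ 2 (by decide)]
              | rw [step _ 3 (by decide)] | rw [step _ 4 (by decide)]) <;>
            simp [taxiRot] <;> (first | (constructor <;> ring) | ring | omega)
        · simp only [taxiStepA, taxiStepB, hF, hR, hL, if_false, ite_false]
          exact step xy d hd

-- ===== VERDICT (by name: the statement is the Claim_ definition above) =====
theorem taxi_zum_zum_spec : Claim_equal_taxi_zum_zum := by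
  intro moves _
  unfold Spec_taxi_zum_zum taxi_zum_zum taxi_zum_zum_alt
  rw [List.foldl_reverse]
  rw [taxi_fold_key moves.toList ((0 : Int), (0 : Int)) 1 (Or.inl rfl)]
  simp [taxiRot]
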